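-- pv_equiv track=rewrite | github.com/dandudzi/dotfiles | dot_config/scripts/track.py | parse_dialog_output
-- ===== SOURCE A (Python) =====
-- def parse_dialog_output(output):
--     """Parse osascript dialog output like 'button returned:Log, text returned:10, gave up:false'."""
--     button = ""
--     text = ""
--     gave_up = False
--     for part in output.split(", "):
--         if part.startswith("button returned:"):
--             button = part.split(":", 1)[1]
--         elif part.startswith("text returned:"):
--             text = part.split(":", 1)[1]
--         elif part.startswith("gave up:"):
--             gave_up = part.split(":", 1)[1].strip().lower() == "true"
--     return button, text, gave_up
-- ===== SOURCE B (Python) =====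
-- def parse_dialog_output(output):
--     """Parse osascript dialog output like 'button returned:Log, text returned:10, gave up:false'."""
--     fields = {}
--     for part in output.split(", "):
--         key, sep, value = part.partition(":")
--         if sep:
--             fields[key] = value
--     button = fields.get("button returned", "")
--     text = fields.get("text returned", "")
--     gave_up = fields.get("gave up", "").strip().lower() == "true"
--     return button, text, gave_up
-- ===== Notes on version B (the rewrite author's own statement) =====
-- stated objective: simpler
-- what changed: Replaces the inline prefix-branching loop by one generic indexing pass that partitions each part at its first ':' into a dict (last-wins), with the three fields extracted by lookup afterwards.
import Mathlib
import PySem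

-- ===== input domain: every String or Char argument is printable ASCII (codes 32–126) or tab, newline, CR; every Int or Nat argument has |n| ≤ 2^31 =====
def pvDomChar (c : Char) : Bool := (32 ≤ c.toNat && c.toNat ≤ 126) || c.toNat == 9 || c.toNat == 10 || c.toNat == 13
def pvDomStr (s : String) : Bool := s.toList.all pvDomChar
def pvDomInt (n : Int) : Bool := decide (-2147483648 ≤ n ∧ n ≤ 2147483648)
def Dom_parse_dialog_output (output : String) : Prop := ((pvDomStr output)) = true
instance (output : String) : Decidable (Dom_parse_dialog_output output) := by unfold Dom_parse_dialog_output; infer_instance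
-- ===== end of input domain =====

-- B replaces A's inline prefix-branching by a partition-into-dict indexing pass plus three lookups (objective: simpler).

-- ===== PORT A =====
-- one loop body of A; part.split(":", 1)[1] never raises in a taken branch (the matched prefix contains ':'), so the .getD "" default is never used
def pvAStep (st : String × String × Bool) (part : String) : String × String × Bool :=
  if PySem.Str.startswith part "button returned:" then
    ((PySem.List.pyGet? ((PySem.Str.splitMax? part ":" 1).getD []) 1).getD "", st.2.1, st.2.2)
  else if PySem.Str.startswith part "text returned:" then
    (st.1, (PySem.List.pyGet? ((PySem.Str.splitMax? part ":" 1).getD []) 1).getD "", st.2.2)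
  else if PySem.Str.startswith part "gave up:" then
    (st.1, st.2.1,
      PySem.Str.lower (PySem.Str.strip ((PySem.List.pyGet? ((PySem.Str.splitMax? part ":" 1).getD []) 1).getD "")) == "true")
  else st

def parse_dialog_output (output : String) : String × String × Bool :=
  ((PySem.Str.split? output ", ").getD []).foldl pvAStep ("", "", false)

-- ===== PORT B =====
-- str.partition(":") hand-ported for this single-char separator: split at the FIRST ':' (exact there)
def pvPartitionColon (cs : List Char) : List Char × List Char × List Char :=
  if ':' ∈ cs then (cs.takeWhile (· ≠ ':'), [':'], (cs.dropWhile (· ≠ ':')).tail)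
  else (cs, [], [])

def pvBStep (d : PySem.Dict String String) (part : String) : PySem.Dict String String :=
  let p := pvPartitionColon part.toList
  if p.2.1.isEmpty then d else d.insert (String.ofList p.1) (String.ofList p.2.2)

def parse_dialog_output_alt (output : String) : String × String × Bool :=
  let d := ((PySem.Str.split? output ", ").getD []).foldl pvBStep PySem.Dict.empty
  (d.getD "button returned" "", d.getD "text returned" "",
   PySem.Str.lower (PySem.Str.strip (d.getD "gave up" "")) == "true")

-- ===== PRECONDITION & SPEC =====
def Spec_parse_dialog_output (output : String) (out : String × String × Bool) : Prop := out = parse_dialog_output_alt output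
instance (output : String) (out : String × String × Bool) : Decidable (Spec_parse_dialog_output output out) := by unfold Spec_parse_dialog_output; infer_instance

-- ===== CLAIM (what is proved, stated in full; the proofs are below) =====
def Claim_equal_parse_dialog_output : Prop := ∀ (output : String), Dom_parse_dialog_output output → Spec_parse_dialog_output output (parse_dialog_output output)

-- ===== LEMMAS AND PROOFS =====

lemma go0 (sep : List Char) (fuel : Nat) (l cur : List Char) (acc : List (List Char)) :
    PySem.Chars.splitOnMax.go sep fuel 0 l cur acc = ((cur.reverse ++ l) :: acc).reverse := by
  cases fuel with
  | zero => rfl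
  | succ f => cases l with
    | nil => simp [PySem.Chars.splitOnMax.go]
    | cons c rest => simp [PySem.Chars.splitOnMax.go]

lemma go1 (l : List Char) : ∀ (fuel : Nat) (cur : List Char) (acc : List (List Char)), l.length < fuel →
    PySem.Chars.splitOnMax.go [':'] fuel 1 l cur acc =
      if ':' ∈ l then acc.reverse ++ [cur.reverse ++ l.takeWhile (· ≠ ':'), (l.dropWhile (· ≠ ':')).tail]
      else acc.reverse ++ [cur.reverse ++ l] := by
  induction l with
  | nil =>
    intro fuel cur acc h
    match fuel, h with
    | (f+1), _ => simp [PySem.Chars.splitOnMax.go]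
  | cons c rest ih =>
    intro fuel cur acc h
    match fuel, h with
    | (f+1), h =>
      by_cases hc : c = ':'
      · subst hc
        have hpre : List.isPrefixOf [':'] (':' :: rest) = true := by simp [List.isPrefixOf]
        simp only [PySem.Chars.splitOnMax.go, hpre, if_pos]
        rw [go0]
        simp [List.takeWhile, List.dropWhile]
      · have hp : List.isPrefixOf [':'] (c :: rest) = false := by
          simp [List.isPrefixOf]; exact fun h' => hc h'.symm
        simp only [PySem.Chars.splitOnMax.go, hp]
        rw [if_neg (by omega), if_neg (by simp)]
        rw [ih f (c :: cur) acc (by simpa using Nat.lt_of_succ_lt_succ h)]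
        simp [hc, Ne.symm hc]

lemma split1_mem (cs : List Char) (h : ':' ∈ cs) :
    PySem.Chars.splitOnMax cs [':'] 1 = [cs.takeWhile (· ≠ ':'), (cs.dropWhile (· ≠ ':')).tail] := by
  unfold PySem.Chars.splitOnMax
  rw [if_neg (by omega)]
  rw [Int.toNat_one, go1 cs (cs.length + 1) [] [] (by omega)]
  simp [h]

lemma takedrop_append (k t : List Char) (hk : ':' ∉ k) :
    (k ++ ':' :: t).takeWhile (· ≠ ':') = k ∧ (k ++ ':' :: t).dropWhile (· ≠ ':') = ':' :: t := by
  induction k with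
  | nil => simp
  | cons a k ih =>
    have ha : a ≠ ':' := by intro h; exact hk (by simp [h])
    have h2 := ih (by intro h; exact hk (by simp [h]))
    simp only [List.cons_append, List.takeWhile_cons, List.dropWhile_cons]
    simp only [decide_not] at h2
    simp [ha, h2.1, h2.2]

lemma startswith_colon_iff (cs k : List Char) (hk : ':' ∉ k) :
    PySem.Chars.startswith cs (k ++ [':']) = true ↔ (':' ∈ cs ∧ cs.takeWhile (· ≠ ':') = k) := by
  rw [PySem.Chars.startswith_iff]
  constructor
  · rintro ⟨t, rfl⟩
    have := takedrop_append k t hk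
    constructor
    · simp
    · simpa using this.1
  · rintro ⟨hm, htw⟩
    have hsplit : cs.takeWhile (· ≠ ':') ++ cs.dropWhile (· ≠ ':') = cs := List.takeWhile_append_dropWhile
    have hne : cs.dropWhile (· ≠ ':') ≠ [] := by
      intro h0
      rw [← hsplit, h0, List.append_nil] at hm
      have := List.mem_takeWhile_imp hm
      simp at this
    have hhead : (cs.dropWhile (· ≠ ':')).head hne = ':' := by
      have := List.head_dropWhile_not (fun x : Char => decide (x ≠ ':')) hne
      simpa using this
    have hcons : ':' :: (cs.dropWhile (· ≠ ':')).tail = cs.dropWhile (· ≠ ':') := by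
      have h3 := List.cons_head_tail hne
      rw [hhead] at h3; exact h3
    have hcs : k ++ ':' :: (cs.dropWhile (· ≠ ':')).tail = cs := by
      rw [hcons, ← htw]; exact hsplit
    exact ⟨(cs.dropWhile (· ≠ ':')).tail, by simpa using hcs⟩




def pvRel (d : PySem.Dict String String) (st : String × String × Bool) : Prop :=
  d.getD "button returned" "" = st.1 ∧ d.getD "text returned" "" = st.2.1 ∧
  (PySem.Str.lower (PySem.Str.strip (d.getD "gave up" "")) == "true") = st.2.2

lemma pvStep_rel (d : PySem.Dict String String) (st : String × String × Bool) (part : String)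
    (h : pvRel d st) : pvRel (pvBStep d part) (pvAStep st part) := by
  obtain ⟨h1, h2, h3⟩ := h
  have hsw : ∀ (pre : String), PySem.Str.startswith part pre = PySem.Chars.startswith part.toList pre.toList := by
    intro pre; simp
  by_cases hmem : ':' ∈ part.toList
  · -- the part has a colon: B inserts (takeWhile, tail of dropWhile)
    have hb : ("button returned:" : String).toList = "button returned".toList ++ [':'] := by decide
    have ht : ("text returned:" : String).toList = "text returned".toList ++ [':'] := by decide
    have hg : ("gave up:" : String).toList = "gave up".toList ++ [':'] := by decide
    have hsplit : PySem.Str.splitMax? part ":" 1 =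
        some [String.ofList (part.toList.takeWhile (· ≠ ':')),
              String.ofList ((part.toList.dropWhile (· ≠ ':')).tail)] := by
      unfold PySem.Str.splitMax? PySem.Chars.splitMax?
      rw [show (":" : String).toList = [':'] from rfl]
      rw [if_neg (by simp)]
      rw [split1_mem _ hmem]
      rfl
    have hpy : (PySem.List.pyGet? ((PySem.Str.splitMax? part ":" 1).getD []) 1).getD "" =
        String.ofList ((part.toList.dropWhile (· ≠ ':')).tail) := by
      rw [hsplit]; rfl
    have hB : pvBStep d part = d.insert (String.ofList (part.toList.takeWhile (· ≠ ':')))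
        (String.ofList ((part.toList.dropWhile (· ≠ ':')).tail)) := by
      unfold pvBStep pvPartitionColon
      simp [hmem]
    set k := part.toList.takeWhile (· ≠ ':') with hk
    set v := String.ofList ((part.toList.dropWhile (· ≠ ':')).tail) with hv
    have swb : PySem.Str.startswith part "button returned:" = true ↔ k = "button returned".toList := by
      rw [hsw, hb, startswith_colon_iff _ _ (by decide)]
      constructor
      · exact fun a => a.2
      · exact fun a => ⟨hmem, a⟩
    have swt : PySem.Str.startswith part "text returned:" = true ↔ k = "text returned".toList := by
      rw [hsw, ht, startswith_colon_iff _ _ (by decide)]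
      constructor
      · exact fun a => a.2
      · exact fun a => ⟨hmem, a⟩
    have swg : PySem.Str.startswith part "gave up:" = true ↔ k = "gave up".toList := by
      rw [hsw, hg, startswith_colon_iff _ _ (by decide)]
      constructor
      · exact fun a => a.2
      · exact fun a => ⟨hmem, a⟩
    by_cases hkb : k = "button returned".toList
    · have hkey : String.ofList k = "button returned" := by rw [hkb]; exact String.ofList_toList
      unfold pvAStep
      rw [if_pos (swb.mpr hkb)]
      rw [hB, hkey]
      refine ⟨?_, ?_, ?_⟩
      · rw [PySem.Dict.getD_insert_self, hpy]
      · rw [PySem.Dict.getD_insert_of_ne d _ _ (by decide)]; exact h2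
      · rw [PySem.Dict.getD_insert_of_ne d _ _ (by decide)]; exact h3
    · by_cases hkt : k = "text returned".toList
      · have hkey : String.ofList k = "text returned" := by rw [hkt]; exact String.ofList_toList
        unfold pvAStep
        rw [if_neg (by rw [swb]; exact hkb), if_pos (swt.mpr hkt)]
        rw [hB, hkey]
        refine ⟨?_, ?_, ?_⟩
        · rw [PySem.Dict.getD_insert_of_ne d _ _ (by decide)]; exact h1
        · rw [PySem.Dict.getD_insert_self, hpy]
        · rw [PySem.Dict.getD_insert_of_ne d _ _ (by decide)]; exact h3
      · by_cases hkg : k = "gave up".toList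
        · have hkey : String.ofList k = "gave up" := by rw [hkg]; exact String.ofList_toList
          unfold pvAStep
          rw [if_neg (by rw [swb]; exact hkb), if_neg (by rw [swt]; exact hkt), if_pos (swg.mpr hkg)]
          rw [hB, hkey]
          refine ⟨?_, ?_, ?_⟩
          · rw [PySem.Dict.getD_insert_of_ne d _ _ (by decide)]; exact h1
          · rw [PySem.Dict.getD_insert_of_ne d _ _ (by decide)]; exact h2
          · rw [PySem.Dict.getD_insert_self, hpy]
        · -- key matches none of the three: A unchanged, B's insert invisible to the three lookups
          have hne : ∀ (s : String), s.toList ≠ k → s ≠ String.ofList k := by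
            intro s hs he
            exact hs (by rw [he, String.toList_ofList])
          unfold pvAStep
          rw [if_neg (by rw [swb]; exact hkb), if_neg (by rw [swt]; exact hkt),
              if_neg (by rw [swg]; exact hkg)]
          rw [hB]
          refine ⟨?_, ?_, ?_⟩
          · rw [PySem.Dict.getD_insert_of_ne d _ _ (hne _ (fun e => hkb e.symm))]; exact h1
          · rw [PySem.Dict.getD_insert_of_ne d _ _ (hne _ (fun e => hkt e.symm))]; exact h2
          · rw [PySem.Dict.getD_insert_of_ne d _ _ (hne _ (fun e => hkg e.symm))]; exact h3
  · -- no colon: both steps are the identity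
    have hB : pvBStep d part = d := by
      unfold pvBStep pvPartitionColon
      simp [hmem]
    have hnosw : ∀ (k : List Char) (pre : String), pre.toList = k ++ [':'] →
        PySem.Chars.startswith part.toList pre.toList = false := by
      intro k pre hpre
      rw [hpre]
      by_contra hcontra
      have : PySem.Chars.startswith part.toList (k ++ [':']) = true := by
        cases hx : PySem.Chars.startswith part.toList (k ++ [':']) with
        | false => exact absurd hx hcontra
        | true => rfl
      obtain ⟨t, hts⟩ := (PySem.Chars.startswith_iff _ _).mp this
      exact hmem (by rw [← hts]; simp)
    unfold pvAStep
    rw [hsw, hnosw "button returned".toList _ (by decide),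
        hsw, hnosw "text returned".toList _ (by decide),
        hsw, hnosw "gave up".toList _ (by decide)]
    simp only [Bool.false_eq_true, if_false]
    rw [hB]
    exact ⟨h1, h2, h3⟩

lemma pvFold_rel (parts : List String) : ∀ (d : PySem.Dict String String) (st : String × String × Bool),
    pvRel d st → pvRel (parts.foldl pvBStep d) (parts.foldl pvAStep st) := by
  induction parts with
  | nil => intro d st h; exact h
  | cons p ps ih => intro d st h; exact ih _ _ (pvStep_rel d st p h)

-- ===== VERDICT (by name: the statement is the Claim_ definition above) =====
theorem parse_dialog_output_spec : Claim_equal_parse_dialog_output := by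
  intro output _
  unfold Spec_parse_dialog_output parse_dialog_output parse_dialog_output_alt
  have h0 : pvRel PySem.Dict.empty ("", "", false) := by
    refine ⟨rfl, rfl, by decide⟩
  obtain ⟨h1, h2, h3⟩ := pvFold_rel ((PySem.Str.split? output ", ").getD []) PySem.Dict.empty ("", "", false) h0
  show _ = ((List.foldl pvBStep PySem.Dict.empty ((PySem.Str.split? output ", ").getD [])).getD "button returned" "",
      (List.foldl pvBStep PySem.Dict.empty ((PySem.Str.split? output ", ").getD [])).getD "text returned" "",
      PySem.Str.lower (PySem.Str.strip ((List.foldl pvBStep PySem.Dict.empty ((PySem.Str.split? output ", ").getD [])).getD "gave up" "")) == "true")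
  rw [h1, h2, h3]
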